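-- pv_equiv track=rewrite | github.com/Chupin-Pierre-Henri/IA_Developpemental | world4.py | nbCycle
-- ===== SOURCE A (Python) =====
-- def nbCycle(actions, cycle) -> int:
--
--     if len(cycle) < 1: return 0
--
--     i = len(actions)
--     nb_eq = 0
--     while i >= len(cycle):
--         c = actions[i - len(cycle): i]
--         if cycle != c:
--             return nb_eq
--         nb_eq += 1
--         i -= len(cycle)
--
--     return nb_eq
-- ===== SOURCE B (Python) =====
-- def nbCycle(actions, cycle) -> int:
--     # One reversed element-wise pass: count how many trailing elements of
--     # actions match cycle repeated cyclically, then whole cycles = count // L.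
--     L = len(cycle)
--     if L < 1:
--         return 0
--     rc = cycle[::-1]
--     m = 0
--     for x in reversed(actions):
--         if x != rc[m % L]:
--             break
--         m += 1
--     return m // L
-- ===== Notes on version B (the rewrite author's own statement) =====
-- stated objective: alternative
-- what changed: Replaces A's chunk-by-chunk suffix slicing and whole-slice comparisons with a single reversed element-wise pass that counts matching trailing elements against the reversed cycle taken cyclically, then divides by the cycle length.
import Mathlib
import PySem

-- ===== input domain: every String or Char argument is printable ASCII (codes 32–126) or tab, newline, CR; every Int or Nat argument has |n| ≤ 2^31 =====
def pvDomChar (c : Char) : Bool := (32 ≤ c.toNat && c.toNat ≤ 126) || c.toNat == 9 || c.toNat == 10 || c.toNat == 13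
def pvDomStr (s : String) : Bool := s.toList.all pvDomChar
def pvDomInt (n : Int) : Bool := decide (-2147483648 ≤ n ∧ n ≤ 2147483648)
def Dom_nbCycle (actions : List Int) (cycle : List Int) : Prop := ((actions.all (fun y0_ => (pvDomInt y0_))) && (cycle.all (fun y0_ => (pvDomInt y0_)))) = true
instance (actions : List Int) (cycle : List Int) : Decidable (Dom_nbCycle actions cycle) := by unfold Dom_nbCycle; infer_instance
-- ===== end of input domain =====

-- B replaces A's chunk-by-chunk suffix slicing with one reversed element-wise pass
-- (count trailing matches against the reversed cycle cyclically, then divide by the length).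

-- ===== PORT A =====
-- A's while loop: i decreases by len(cycle) ≥ 1 each iteration (the 0 < cycle.length
-- conjunct is only the termination guard; it always holds when the loop is entered).
def nbCycleLoop (actions : List Int) (cycle : List Int) (i : Nat) (nb : Int) : Int :=
  if h : cycle.length ≤ i ∧ 0 < cycle.length then
    let c := PySem.List.slice actions (some ((i - cycle.length : Nat) : Int)) (some (i : Int))
    if cycle ≠ c then nb
    else nbCycleLoop actions cycle (i - cycle.length) (nb + 1)
  else nb
termination_by i
decreasing_by omega

def nbCycle (actions : List Int) (cycle : List Int) : Int :=
  if cycle.length < 1 then 0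
  else nbCycleLoop actions cycle actions.length 0

-- ===== PORT B =====
-- the for-loop with break over reversed(actions); rc[m % L] is in range
-- (0 ≤ m % L < L = rc.length), so getD is exact here.
def cntB (rc : List Int) (L : Nat) (m : Nat) : List Int → Nat
  | [] => m
  | x :: xs => if x ≠ rc.getD (m % L) 0 then m else cntB rc L (m + 1) xs

def nbCycle_alt (actions : List Int) (cycle : List Int) : Int :=
  if cycle.length < 1 then 0
  else ((cntB cycle.reverse cycle.length 0 actions.reverse / cycle.length : Nat) : Int)

-- ===== PRECONDITION & SPEC =====
def Spec_nbCycle (actions : List Int) (cycle : List Int) (out : Int) : Prop := out = nbCycle_alt actions cycle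
instance (actions : List Int) (cycle : List Int) (out : Int) : Decidable (Spec_nbCycle actions cycle out) := by unfold Spec_nbCycle; infer_instance

-- ===== CLAIM (what is proved, stated in full; the proofs are below) =====
def Claim_equal_nbCycle : Prop := ∀ (actions : List Int) (cycle : List Int), Dom_nbCycle actions cycle → Spec_nbCycle actions cycle (nbCycle actions cycle)

-- ===== LEMMAS AND PROOFS =====

-- cntB never advances past the end of the list
theorem cntB_le (rc : List Int) (L : Nat) : ∀ (zs : List Int) (m : Nat), cntB rc L m zs ≤ m + zs.length := by
  intro zs
  induction zs with
  | nil => intro m; simp [cntB]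
  | cons x xs ih =>
    intro m
    simp only [cntB]
    split
    · omega
    · have := ih (m + 1); simpa using by omega

-- shifting the counter by a full period L shifts the result by L
theorem cntB_shift (rc : List Int) (L : Nat) : ∀ (zs : List Int) (m : Nat), cntB rc L (m + L) zs = L + cntB rc L m zs := by
  intro zs
  induction zs with
  | nil => intro m; simp [cntB, Nat.add_comm]
  | cons x xs ih =>
    intro m
    simp only [cntB, Nat.add_mod_right]
    split
    · omega
    · have h := ih (m + 1)
      have : m + L + 1 = (m + 1) + L := by omega
      rw [this, h]

-- characterization of one chunk: starting at offset m (a partial chunk remains),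
-- either the rest of the chunk matches and we continue at offset L, or the result stays below L.
theorem cntB_chunk (rc : List Int) (L : Nat) (hL : rc.length = L) :
    ∀ (k : Nat) (m : Nat) (zs : List Int), m + k = L → L ≤ m + zs.length →
      (zs.take k = rc.drop m → cntB rc L m zs = cntB rc L L (zs.drop k)) ∧
      (zs.take k ≠ rc.drop m → cntB rc L m zs < L) := by
  intro k
  induction k with
  | zero =>
    intro m zs hm _
    have hmL : m = L := by omega
    subst hmL
    constructor
    · intro _; simp
    · intro hne
      exact absurd (by simp [List.drop_eq_nil_of_le (le_of_eq hL)]) hne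
  | succ k ih =>
    intro m zs hm hlen
    have hmL : m < L := by omega
    match zs with
    | [] => exfalso; simp at hlen; omega
    | x :: xs =>
      have hmrc : m < rc.length := by omega
      have hdrop : rc.drop m = rc[m] :: rc.drop (m + 1) := List.drop_eq_getElem_cons hmrc
      have hmod : m % L = m := Nat.mod_eq_of_lt hmL
      have hget : rc.getD (m % L) 0 = rc[m] := by
        rw [hmod]; simp [List.getD_eq_getElem?_getD, List.getElem?_eq_getElem hmrc]
      constructor
      · intro htake
        rw [List.take_succ_cons, hdrop] at htake
        have hx : x = rc[m] := (List.cons.injEq _ _ _ _ ▸ htake).1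
        have hxs : xs.take k = rc.drop (m + 1) := (List.cons.injEq _ _ _ _ ▸ htake).2
        simp only [cntB, hget, hx, ne_eq, not_true_eq_false, if_false]
        simp only [List.drop_succ_cons]
        exact (ih (m + 1) xs (by omega) (by simp at hlen ⊢; omega)).1 hxs
      · intro hne
        by_cases hx : x = rc.getD (m % L) 0
        · have hx' : x = rc[m] := by rw [hx, hget]
          simp only [cntB, hx, ne_eq, not_true_eq_false, if_false]
          apply (ih (m + 1) xs (by omega) (by simp at hlen ⊢; omega)).2
          intro hxs
          apply hne
          rw [List.take_succ_cons, hdrop, hx', hxs]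
        · simp only [cntB, ne_eq, hx, not_false_eq_true, if_pos]
          omega

-- main loop correspondence: A's loop on prefix length i equals nb + (elementwise count)/L
theorem main_loop (actions : List Int) (cycle : List Int) (hc : 0 < cycle.length) :
    ∀ (i : Nat), i ≤ actions.length → ∀ (nb : Int),
      nbCycleLoop actions cycle i nb
        = nb + ((cntB cycle.reverse cycle.length 0 ((actions.take i).reverse) / cycle.length : Nat) : Int) := by
  intro i
  induction i using Nat.strong_induction_on with
  | _ i ih =>
    intro hi nb
    set L := cycle.length with hLdef
    set rc := cycle.reverse with hrcdef
    have hrcL : rc.length = L := by simp [hrcdef, hLdef]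
    set zs := (actions.take i).reverse with hzs
    have hzslen : zs.length = i := by simp [hzs]; omega
    by_cases hiL : L ≤ i
    · -- loop body runs
      have hchunk : PySem.List.slice actions (some ((i - L : Nat) : Int)) (some (i : Int))
          = (actions.drop (i - L)).take (i - (i - L)) := PySem.List.slice_natCast actions (i - L) i
      have htd : (actions.drop (i - L)).take (i - (i - L)) = (actions.take i).drop (i - L) := by
        rw [List.drop_take]
      have hrevchunk : ((actions.take i).drop (i - L)).reverse = zs.take L := by
        rw [hzs, List.take_reverse]
        have h1 : (actions.take i).length = i := by simp; omega
        rw [h1]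
      have hcond : (cycle = (actions.take i).drop (i - L)) ↔ (zs.take L = rc) := by
        constructor
        · intro h; rw [← hrevchunk, ← h, hrcdef]
        · intro h
          have := congrArg List.reverse h
          rw [← hrevchunk] at this
          simp only [List.reverse_reverse, hrcdef] at this
          exact this.symm
      have hchar := cntB_chunk rc L hrcL L 0 zs (by omega) (by omega)
      rw [nbCycleLoop, dif_pos ⟨hiL, hc⟩]
      rw [show PySem.List.slice actions (some ((i - cycle.length : Nat) : Int)) (some (i : Int))
            = (actions.take i).drop (i - L) from by rw [← hLdef, hchunk, htd]]
      by_cases heq : cycle = (actions.take i).drop (i - L)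
      · -- chunk matches: recurse
        rw [if_neg (by simp [heq])]
        have htk : zs.take L = rc := hcond.mp heq
        have hdropzs : zs.drop L = (actions.take (i - L)).reverse := by
          rw [hzs, List.drop_reverse]
          congr 1
          have h1 : (actions.take i).length = i := by simp; omega
          rw [h1, List.take_take]
          congr 1
          omega
        have h1 : cntB rc L 0 zs = cntB rc L L (zs.drop L) := (hchar.1 (by simpa using htk))
        have h2 : cntB rc L L (zs.drop L) = L + cntB rc L 0 (zs.drop L) := by
          have := cntB_shift rc L (zs.drop L) 0
          simpa using this
        rw [ih (i - L) (by omega) (by omega) (nb + 1)]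
        rw [← hdropzs, h1, h2, Nat.add_comm L, Nat.add_div_right _ hc]
        push_cast
        ring
      · -- chunk mismatches: loop returns nb; elementwise count < L
        rw [if_pos (by simpa using heq)]
        have hlt : cntB rc L 0 zs < L := hchar.2 (fun h => heq (hcond.mpr h))
        rw [Nat.div_eq_of_lt hlt]
        simp
    · -- i < L: loop exits; count ≤ zs.length = i < L
      rw [nbCycleLoop, dif_neg (by omega)]
      have := cntB_le rc L zs 0
      have hlt : cntB rc L 0 zs < L := by omega
      rw [Nat.div_eq_of_lt hlt]
      simp

-- ===== VERDICT (by name: the statement is the Claim_ definition above) =====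
theorem nbCycle_spec : Claim_equal_nbCycle := by
  intro actions cycle _
  unfold Spec_nbCycle nbCycle nbCycle_alt
  by_cases hc : cycle.length < 1
  · simp [hc]
  · have hc' : 0 < cycle.length := by omega
    rw [if_neg hc, if_neg hc]
    have := main_loop actions cycle hc' actions.length (le_refl _) 0
    rw [List.take_length] at this
    simpa using this
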